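-- pv_equiv track=rewrite | github.com/ssoso27/Smoothie2 | pythAlgo/swtonghap/01/06.py | countPerms
-- ===== SOURCE A (Python) =====
-- def countPerms(n):
--     MOD = 10 ** 9 + 7
--
--     counts = {
--         'a': [0 for _ in range(n)],
--         'e': [0 for _ in range(n)],
--         'i': [0 for _ in range(n)],
--         'o': [0 for _ in range(n)],
--         'u': [0 for _ in range(n)]
--     }
--
--     for k in counts.keys():
--         counts[k][0] = 1
--
--     for i in range(1, n):
--         counts['a'][i] = (counts['e'][i - 1] + counts['u'][i - 1] + counts['i'][i - 1]) % MOD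
--         counts['e'][i] = (counts['a'][i - 1] + counts['i'][i - 1]) % MOD
--         counts['i'][i] = (counts['e'][i - 1] + counts['o'][i - 1]) % MOD
--         counts['o'][i] = (counts['i'][i - 1]) % MOD
--         counts['u'][i] = (counts['i'][i - 1] + counts['o'][i - 1]) % MOD
--
--     total = 0
--     for k in counts.keys():
--         total = (total + counts[k][n - 1]) % MOD
--
--     return total
-- ===== SOURCE B (Python) =====
-- # Matrix fast-exponentiation re-implementation: answer = sum of all entries of T^(n-1) mod 1e9+7,
-- # where T is the 5x5 vowel-transition matrix (the start vector is all ones).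
-- MOD = 10 ** 9 + 7
--
-- # row order a,e,i,o,u; T[r][c] = 1 iff vowel c (at position i-1) may be followed so that
-- # position i holds vowel r, matching the DP: a<-e,i,u; e<-a,i; i<-e,o; o<-i; u<-i,o
-- T = [
--     [0, 1, 1, 0, 1],
--     [1, 0, 1, 0, 0],
--     [0, 1, 0, 1, 0],
--     [0, 0, 1, 0, 0],
--     [0, 0, 1, 1, 0],
-- ]
--
-- def mat_mult(A, B):
--     return [[sum(A[i][k] * B[k][j] for k in range(5)) % MOD for j in range(5)]
--             for i in range(5)]
--
-- def mat_pow(M, p):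
--     R = [[1 if i == j else 0 for j in range(5)] for i in range(5)]
--     while p:
--         if p & 1:
--             R = mat_mult(R, M)
--         M = mat_mult(M, M)
--         p >>= 1
--     return R
--
-- def countPerms(n):
--     P = mat_pow(T, n - 1)
--     return sum(sum(row) for row in P) % MOD
-- ===== Notes on version B (the rewrite author's own statement) =====
-- stated objective: faster
-- what changed: Replaces A's O(n) five-list dynamic programming with binary exponentiation of the 5x5 vowel-transition matrix, returning the sum of all entries of T^(n-1) mod 1e9+7.
import Mathlib
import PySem

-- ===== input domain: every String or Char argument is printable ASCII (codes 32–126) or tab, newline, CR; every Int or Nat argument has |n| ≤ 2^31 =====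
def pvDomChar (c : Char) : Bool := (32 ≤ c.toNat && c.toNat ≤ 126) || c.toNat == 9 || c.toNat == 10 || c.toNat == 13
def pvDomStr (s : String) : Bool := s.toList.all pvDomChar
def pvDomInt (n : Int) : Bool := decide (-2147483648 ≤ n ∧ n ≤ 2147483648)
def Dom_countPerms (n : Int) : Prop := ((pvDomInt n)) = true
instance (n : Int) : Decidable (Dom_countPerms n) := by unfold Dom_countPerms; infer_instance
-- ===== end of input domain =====

-- B replaces A's O(n) dynamic programming with 5x5 transition-matrix binary exponentiation, O(log n).
-- MOD = 10 ** 9 + 7 (same constant in both Pythons)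
def pvMOD : Int := 1000000007

-- ===== PORT A =====
-- A's dict has five fixed literal keys 'a','e','i','o','u' created once and never added to or removed;
-- it is ported as a record with one field per key, statement for statement, key order a,e,i,o,u preserved.
-- Python lists support O(1) indexing, so each is ported as an Array Int.
structure VCounts where
  a : Array Int
  e : Array Int
  i : Array Int
  o : Array Int
  u : Array Int

-- the body of A's 'for i in range(1, n)' loop; each Python assignment is one sequential update.
-- All indices are in range under Pre_ (1 ≤ idx < n = size), so setIfInBounds / getD are exact
-- (Python would raise IndexError only out of range, which never happens inside the loop).
def stepA (c : VCounts) (idx : Int) : VCounts :=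
  let j := idx.toNat   -- idx ∈ range(1, n) so idx ≥ 1; toNat is exact here
  match c with
  | ⟨va, ve, vi, vo, vu⟩ =>
    let ca := va.setIfInBounds j (PySem.Int.mod (ve.getD (j-1) 0 + vu.getD (j-1) 0 + vi.getD (j-1) 0) pvMOD)
    let ce := ve.setIfInBounds j (PySem.Int.mod (ca.getD (j-1) 0 + vi.getD (j-1) 0) pvMOD)
    let ci := vi.setIfInBounds j (PySem.Int.mod (ce.getD (j-1) 0 + vo.getD (j-1) 0) pvMOD)
    let co := vo.setIfInBounds j (PySem.Int.mod (ci.getD (j-1) 0) pvMOD)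
    let cu := vu.setIfInBounds j (PySem.Int.mod (ci.getD (j-1) 0 + co.getD (j-1) 0) pvMOD)
    ⟨ca, ce, ci, co, cu⟩

def countPerms (n : Int) : Int :=
  -- [0 for _ in range(n)]
  let zeros : Array Int := ((PySem.List.pyRange 0 n 1).map (fun _ => 0)).toArray
  let c0 : VCounts := ⟨zeros, zeros, zeros, zeros, zeros⟩
  -- for k in counts.keys(): counts[k][0] = 1   (IndexError when n ≤ 0: excluded by Pre_)
  let c1 : VCounts := ⟨c0.a.setIfInBounds 0 1, c0.e.setIfInBounds 0 1, c0.i.setIfInBounds 0 1,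
                       c0.o.setIfInBounds 0 1, c0.u.setIfInBounds 0 1⟩
  -- for i in range(1, n): ...
  let c2 : VCounts := (PySem.List.pyRange 1 n 1).foldl stepA c1
  -- total-accumulation loop over the keys in order a,e,i,o,u
  let m := (n - 1).toNat   -- n-1 ≥ 0 under Pre_; counts[k][n-1]
  let t1 := PySem.Int.mod (0 + c2.a.getD m 0) pvMOD
  let t2 := PySem.Int.mod (t1 + c2.e.getD m 0) pvMOD
  let t3 := PySem.Int.mod (t2 + c2.i.getD m 0) pvMOD
  let t4 := PySem.Int.mod (t3 + c2.o.getD m 0) pvMOD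
  PySem.Int.mod (t4 + c2.u.getD m 0) pvMOD

-- ===== PORT B =====
-- B's 5x5 matrices are Python lists of lists of ints, ported as List (List Int).
-- B's global table T (row/column order a,e,i,o,u)
def tMat : List (List Int) :=
  [[0, 1, 1, 0, 1],
   [1, 0, 1, 0, 0],
   [0, 1, 0, 1, 0],
   [0, 0, 1, 0, 0],
   [0, 0, 1, 1, 0]]

-- A[i][k] for a 5x5 grid; every access B makes is in range, so getD is exact here
def matIdx (A : List (List Int)) (i k : Nat) : Int := (A.getD i []).getD k 0

-- mat_mult(A, B): [[sum(A[i][k] * B[k][j] for k in range(5)) % MOD for j in range(5)] for i in range(5)]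
def matMult (A B : List (List Int)) : List (List Int) :=
  (List.range 5).map (fun i => (List.range 5).map (fun j =>
    PySem.Int.mod (((List.range 5).map (fun k => matIdx A i k * matIdx B k j)).sum) pvMOD))

-- R = [[1 if i == j else 0 for j in range(5)] for i in range(5)]
def idMat5 : List (List Int) :=
  (List.range 5).map (fun i => (List.range 5).map (fun j => if i = j then (1 : Int) else 0))

-- mat_pow's 'while p:' loop with accumulator R; the extra fuel argument only makes the loop total
-- (p strictly halves every iteration, so any fuel ≥ p reproduces the Python loop exactly)
def matPowLoop (fuel : Nat) (M R : List (List Int)) (p : Nat) : List (List Int) :=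
  match fuel with
  | 0 => R
  | fuel + 1 =>
    if p = 0 then R
    else matPowLoop fuel (matMult M M) (if p % 2 = 1 then matMult R M else R) (p / 2)

def countPerms_alt (n : Int) : Int :=
  -- P = mat_pow(T, n - 1); Python's while loop never terminates for n ≤ 0 (excluded by Pre_)
  let P := matPowLoop (n - 1).toNat tMat idMat5 (n - 1).toNat
  -- sum(sum(row) for row in P) % MOD
  PySem.Int.mod ((P.map List.sum).sum) pvMOD

-- ===== PRECONDITION & SPEC =====
-- Pre_ excludes n ≤ 0: there A raises IndexError at counts[k][0] = 1 (and B's while loop on n-1 < 0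
-- would not terminate). For n ≥ 1 both programs return normally.
def Pre_countPerms (n : Int) : Prop := 1 ≤ n
instance (n : Int) : Decidable (Pre_countPerms n) := by unfold Pre_countPerms; infer_instance
def pvWitness_countPerms : Int := 3

def Spec_countPerms (n : Int) (out : Int) : Prop := out = countPerms_alt n
instance (n : Int) (out : Int) : Decidable (Spec_countPerms n out) := by unfold Spec_countPerms; infer_instance

-- ===== CLAIM (what is proved, stated in full; the proofs are below) =====
def Claim_equal_countPerms : Prop := ∀ (n : Int), Dom_countPerms n → Pre_countPerms n → Spec_countPerms n (countPerms n)

-- ===== LEMMAS AND PROOFS =====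

-- the exact quintuple (a,e,i,o,u) of Int values A stores at position k of its five lists
def sRec : Nat → Int × Int × Int × Int × Int
  | 0 => (1, 1, 1, 1, 1)
  | k+1 =>
    let v := sRec k
    (PySem.Int.mod (v.2.1 + v.2.2.2.2 + v.2.2.1) pvMOD,
     PySem.Int.mod (v.1 + v.2.2.1) pvMOD,
     PySem.Int.mod (v.2.1 + v.2.2.2.1) pvMOD,
     PySem.Int.mod (v.2.2.1) pvMOD,
     PySem.Int.mod (v.2.2.1 + v.2.2.2.1) pvMOD)

-- ---------- generic facts about PySem.Int.mod by pvMOD ----------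

theorem pvMOD_pos : (0 : Int) < pvMOD := by norm_num [pvMOD]

theorem cast_pymod (x : Int) :
    ((PySem.Int.mod x pvMOD : Int) : ZMod 1000000007) = (x : ZMod 1000000007) := by
  rw [PySem.Int.mod_eq_emod_of_pos pvMOD_pos]
  have h : (pvMOD : Int) = ((1000000007 : ℕ) : Int) := by norm_num [pvMOD]
  rw [h, ZMod.intCast_mod]

theorem pymod_bounds (x : Int) :
    0 ≤ PySem.Int.mod x pvMOD ∧ PySem.Int.mod x pvMOD < 1000000007 := by
  refine ⟨PySem.Int.mod_nonneg x pvMOD_pos, ?_⟩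
  have := PySem.Int.mod_lt x pvMOD_pos
  simpa [pvMOD] using this

theorem int_eq_of_cast_eq {x y : Int} (hx0 : 0 ≤ x) (hx1 : x < 1000000007)
    (hy0 : 0 ≤ y) (hy1 : y < 1000000007)
    (h : (x : ZMod 1000000007) = (y : ZMod 1000000007)) : x = y := by
  have h2 := (ZMod.intCast_eq_intCast_iff' x y 1000000007).mp h
  have hc : ((1000000007 : ℕ) : Int) = 1000000007 := by norm_num
  rw [hc] at h2
  omega

-- ---------- lifting B's matrices to ZMod ----------

def liftZ (A : List (List Int)) : Matrix (Fin 5) (Fin 5) (ZMod 1000000007) :=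
  Matrix.of fun i j => ((matIdx A i.1 j.1 : Int) : ZMod 1000000007)

theorem range5_eq : List.range 5 = [0, 1, 2, 3, 4] := by decide

theorem matIdx_grid (f : Nat → Nat → Int) {i j : Nat} (hi : i < 5) (hj : j < 5) :
    matIdx ((List.range 5).map (fun i => (List.range 5).map (fun j => f i j))) i j = f i j := by
  simp [matIdx, List.getD_eq_getElem?_getD, hi, hj]

theorem liftZ_mul (A B : List (List Int)) :
    liftZ (matMult A B) = liftZ A * liftZ B := by
  ext i j
  simp only [liftZ, Matrix.of_apply, Matrix.mul_apply, matMult]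
  rw [matIdx_grid _ i.isLt j.isLt, range5_eq]
  have e0 : ((0 : Fin 5) : Nat) = 0 := rfl
  have e1 : ((1 : Fin 5) : Nat) = 1 := rfl
  have e2 : ((2 : Fin 5) : Nat) = 2 := rfl
  have e3 : ((3 : Fin 5) : Nat) = 3 := rfl
  have e4 : ((4 : Fin 5) : Nat) = 4 := rfl
  simp only [List.map_cons, List.map_nil, List.sum_cons, List.sum_nil, cast_pymod,
    Fin.sum_univ_five, e0, e1, e2, e3, e4]
  push_cast
  ring

theorem liftZ_matPowLoop : ∀ (fuel p : Nat), p ≤ fuel → ∀ (M R : List (List Int)),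
    liftZ (matPowLoop fuel M R p) = liftZ R * (liftZ M) ^ p := by
  intro fuel
  induction fuel with
  | zero =>
    intro p hp M R
    have h0 : p = 0 := by omega
    subst h0
    simp [matPowLoop]
  | succ fuel ih =>
    intro p hp M R
    by_cases hp0 : p = 0
    · subst hp0
      simp [matPowLoop]
    · have hle : p / 2 ≤ fuel := by omega
      simp only [matPowLoop, hp0, if_false]
      rw [ih (p / 2) hle]
      have hMM : (liftZ (matMult M M)) ^ (p / 2) = liftZ M ^ (2 * (p / 2)) := by
        rw [liftZ_mul, ← pow_two, ← pow_mul]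
      by_cases h2 : p % 2 = 1
      · rw [if_pos h2, liftZ_mul, hMM, mul_assoc, ← pow_succ']
        have hp2 : 2 * (p / 2) + 1 = p := by omega
        rw [hp2]
      · rw [if_neg h2, hMM]
        have hp2 : 2 * (p / 2) = p := by omega
        rw [hp2]

theorem liftZ_id : liftZ idMat5 = 1 := by
  ext i j
  simp only [liftZ, Matrix.of_apply, idMat5]
  rw [matIdx_grid _ i.isLt j.isLt]
  by_cases h : i = j
  · simp [h, Matrix.one_apply]
  · have hv : ¬ (i.1 = j.1) := fun hh => h (Fin.ext hh)
    simp [h, hv]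

-- the matrices B's loop produces are always 5x5 comprehension grids
def isGrid (P : List (List Int)) : Prop :=
  ∃ f : Nat → Nat → Int, P = (List.range 5).map (fun i => (List.range 5).map (fun j => f i j))

theorem isGrid_matMult (A B : List (List Int)) : isGrid (matMult A B) := ⟨_, rfl⟩

theorem isGrid_id : isGrid idMat5 := ⟨_, rfl⟩

theorem isGrid_matPowLoop : ∀ (fuel : Nat) (M R : List (List Int)) (p : Nat),
    isGrid R → isGrid (matPowLoop fuel M R p) := by
  intro fuel
  induction fuel with
  | zero => intro M R p h; simpa [matPowLoop] using h
  | succ fuel ih =>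
    intro M R p h
    by_cases hp0 : p = 0
    · simpa [matPowLoop, hp0] using h
    · simp only [matPowLoop, hp0, if_false]
      exact ih _ _ _ (by by_cases h2 : p % 2 = 1 <;> simp [h2, isGrid_matMult, h])

theorem sum_entries_cast {P : List (List Int)} (h : isGrid P) :
    (((P.map List.sum).sum : Int) : ZMod 1000000007) =
      ∑ i : Fin 5, ∑ j : Fin 5, liftZ P i j := by
  obtain ⟨f, rfl⟩ := h
  have hm : ∀ (i j : Fin 5),
      liftZ ((List.range 5).map (fun i => (List.range 5).map (fun j => f i j))) i j
        = ((f i.1 j.1 : Int) : ZMod 1000000007) := by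
    intro i j
    simp only [liftZ, Matrix.of_apply]
    rw [matIdx_grid _ i.isLt j.isLt]
  have e0 : ((0 : Fin 5) : Nat) = 0 := rfl
  have e1 : ((1 : Fin 5) : Nat) = 1 := rfl
  have e2 : ((2 : Fin 5) : Nat) = 2 := rfl
  have e3 : ((3 : Fin 5) : Nat) = 3 := rfl
  have e4 : ((4 : Fin 5) : Nat) = 4 := rfl
  simp only [Fin.sum_univ_five, hm, e0, e1, e2, e3, e4]
  simp only [range5_eq, List.map_cons, List.map_nil, List.sum_cons, List.sum_nil]
  push_cast
  ring

-- ---------- the ZMod state vector and its recurrence ----------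

def vZ (k : Nat) : Fin 5 → ZMod 1000000007 :=
  Matrix.mulVec ((liftZ tMat) ^ k) (fun _ => 1)

theorem vZ_zero : vZ 0 = fun _ => 1 := by
  simp [vZ, Matrix.one_mulVec]

theorem vZ_succ (k : Nat) : vZ (k + 1) = Matrix.mulVec (liftZ tMat) (vZ k) := by
  simp only [vZ, pow_succ']
  rw [← Matrix.mulVec_mulVec]

theorem mulVec_rows (w : Fin 5 → ZMod 1000000007) :
    (Matrix.mulVec (liftZ tMat) w) 0 = w 1 + w 2 + w 4 ∧
    (Matrix.mulVec (liftZ tMat) w) 1 = w 0 + w 2 ∧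
    (Matrix.mulVec (liftZ tMat) w) 2 = w 1 + w 3 ∧
    (Matrix.mulVec (liftZ tMat) w) 3 = w 2 ∧
    (Matrix.mulVec (liftZ tMat) w) 4 = w 2 + w 3 := by
  refine ⟨?_, ?_, ?_, ?_, ?_⟩ <;>
    · simp [liftZ, tMat, matIdx, Matrix.mulVec, dotProduct, Fin.sum_univ_five]
      try ring

theorem sRec_cast : ∀ k : Nat,
    (((sRec k).1 : Int) : ZMod 1000000007) = vZ k 0 ∧
    (((sRec k).2.1 : Int) : ZMod 1000000007) = vZ k 1 ∧
    (((sRec k).2.2.1 : Int) : ZMod 1000000007) = vZ k 2 ∧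
    (((sRec k).2.2.2.1 : Int) : ZMod 1000000007) = vZ k 3 ∧
    (((sRec k).2.2.2.2 : Int) : ZMod 1000000007) = vZ k 4 := by
  intro k
  induction k with
  | zero => simp [sRec, vZ_zero]
  | succ k ih =>
    obtain ⟨h0, h1, h2, h3, h4⟩ := ih
    obtain ⟨r0, r1, r2, r3, r4⟩ := mulVec_rows (vZ k)
    rw [vZ_succ] at *
    simp only [sRec, cast_pymod]
    push_cast
    rw [r0, r1, r2, r3, r4, ← h0, ← h1, ← h2, ← h3, ← h4]
    refine ⟨by ring, by ring, by ring, by ring, by ring⟩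

-- ---------- A's list manipulation ----------

theorem getD_set_self {a : Array Int} {j : Nat} (h : j < a.size) (v : Int) :
    (a.setIfInBounds j v).getD j 0 = v := by
  simp [h]

theorem getD_set_ne {a : Array Int} {j j' : Nat} (h : j ≠ j') (v : Int) :
    (a.setIfInBounds j v).getD j' 0 = a.getD j' 0 := by
  simp [h]

def goodC (n' m : Nat) (c : VCounts) : Prop :=
  c.a.size = n' ∧ c.e.size = n' ∧ c.i.size = n' ∧ c.o.size = n' ∧ c.u.size = n' ∧
  ∀ j, j < m →
    c.a.getD j 0 = (sRec j).1 ∧ c.e.getD j 0 = (sRec j).2.1 ∧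
    c.i.getD j 0 = (sRec j).2.2.1 ∧ c.o.getD j 0 = (sRec j).2.2.2.1 ∧
    c.u.getD j 0 = (sRec j).2.2.2.2

theorem stepA_good {n' m : Nat} {c : VCounts} (h : goodC n' m c)
    (h1 : 1 ≤ m) (h2 : m < n') : goodC n' (m + 1) (stepA c (m : Int)) := by
  obtain ⟨va, ve, vi, vo, vu⟩ := c
  obtain ⟨la, le, li, lo, lu, hent⟩ := h
  obtain ⟨pa, pe, pi, po, pu⟩ := hent (m - 1) (by omega)
  have hj : (↑m : Int).toNat = m := Int.toNat_natCast m
  have hne : m ≠ m - 1 := by omega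
  -- unfold one step of sRec at index m = (m-1)+1
  obtain ⟨t, rfl⟩ : ∃ t, m = t + 1 := ⟨m - 1, by omega⟩
  simp only [Nat.add_sub_cancel] at pa pe pi po pu hne
  refine ⟨?_, ?_, ?_, ?_, ?_, ?_⟩
  · simp [stepA, Array.size_setIfInBounds, la]
  · simp [stepA, Array.size_setIfInBounds, le]
  · simp [stepA, Array.size_setIfInBounds, li]
  · simp [stepA, Array.size_setIfInBounds, lo]
  · simp [stepA, Array.size_setIfInBounds, lu]
  simp only [stepA, hj, Nat.add_sub_cancel]
  intro j hjm
  rcases Nat.lt_or_ge j (t + 1) with hlt | hge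
  · -- old entries are untouched (set at index t+1 > j is a different index)
    have hne' : t + 1 ≠ j := by omega
    obtain ⟨qa, qe, qi, qo, qu⟩ := hent j hlt
    simp only [getD_set_ne hne']
    exact ⟨qa, qe, qi, qo, qu⟩
  · have hje : j = t + 1 := by omega
    subst hje
    have hlen : ∀ a : Array Int, a.size = n' → t + 1 < a.size := by
      intro a ha; omega
    -- reads at index t give sRec t; the freshly written lists agree at t with the old ones
    simp only [getD_set_ne hne, getD_set_self (hlen _ la), getD_set_self (hlen _ le),
      getD_set_self (hlen _ li), getD_set_self (hlen _ lo), getD_set_self (hlen _ lu),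
      pa, pe, pi, po, pu]
    simp [sRec]

theorem foldA_good {n' : Nat} {c1 : VCounts} (h : goodC n' 1 c1) :
    ∀ m : Nat, 1 ≤ m → m ≤ n' →
      goodC n' m ((PySem.List.pyRange 1 (m : Int) 1).foldl stepA c1) := by
  intro m
  induction m with
  | zero => omega
  | succ m ih =>
    intro _ hle
    rcases Nat.eq_or_lt_of_le (show 1 ≤ m + 1 from by omega) with h1 | h1
    · -- m + 1 = 1 : empty range
      have hm : m = 0 := by omega
      subst hm
      rw [PySem.List.pyRange_one_eq_nil (by norm_num)]
      simpa using h
    · have hm1 : 1 ≤ m := by omega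
      have hcast : ((m + 1 : Nat) : Int) = (m : Int) + 1 := by push_cast; ring
      rw [hcast, PySem.List.pyRange_one_succ_right (by exact_mod_cast Nat.one_le_cast.mpr hm1),
        List.foldl_append]
      simp only [List.foldl_cons, List.foldl_nil]
      exact stepA_good (ih hm1 (by omega)) hm1 (by omega)

theorem initC_good {n : Int} (hn : 1 ≤ n) :
    goodC n.toNat 1
      (⟨(((PySem.List.pyRange 0 n 1).map (fun _ => (0:Int))).toArray).setIfInBounds 0 1,
        (((PySem.List.pyRange 0 n 1).map (fun _ => (0:Int))).toArray).setIfInBounds 0 1,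
        (((PySem.List.pyRange 0 n 1).map (fun _ => (0:Int))).toArray).setIfInBounds 0 1,
        (((PySem.List.pyRange 0 n 1).map (fun _ => (0:Int))).toArray).setIfInBounds 0 1,
        (((PySem.List.pyRange 0 n 1).map (fun _ => (0:Int))).toArray).setIfInBounds 0 1⟩ : VCounts) := by
  have hlen : ((((PySem.List.pyRange 0 n 1).map (fun _ => (0:Int))).toArray).setIfInBounds 0 1).size
      = n.toNat := by
    simp [PySem.List.length_pyRange_one]
  have hpos : 0 < (((PySem.List.pyRange 0 n 1).map (fun _ => (0:Int))).toArray).size := by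
    simp [PySem.List.length_pyRange_one]; omega
  refine ⟨hlen, hlen, hlen, hlen, hlen, ?_⟩
  intro j hj
  have hj0 : j = 0 := by omega
  subst hj0
  rw [getD_set_self hpos]
  simp [sRec]

-- ---------- putting the two sides together ----------

theorem countPerms_eq_sRec {n : Int} (hn : 1 ≤ n) :
    countPerms n =
      (PySem.Int.mod (PySem.Int.mod (PySem.Int.mod (PySem.Int.mod (PySem.Int.mod
        (0 + (sRec (n.toNat - 1)).1) pvMOD + (sRec (n.toNat - 1)).2.1) pvMOD
        + (sRec (n.toNat - 1)).2.2.1) pvMOD + (sRec (n.toNat - 1)).2.2.2.1) pvMOD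
        + (sRec (n.toNat - 1)).2.2.2.2) pvMOD) := by
  have hcast : ((n.toNat : Nat) : Int) = n := Int.toNat_of_nonneg (by omega)
  have hgood := foldA_good (initC_good hn) n.toNat (by omega) (le_refl _)
  rw [hcast] at hgood
  obtain ⟨-, -, -, -, -, hent⟩ := hgood
  obtain ⟨pa, pe, pi, po, pu⟩ := hent (n.toNat - 1) (by omega)
  have hidx : (n - 1).toNat = n.toNat - 1 := by omega
  simp only [countPerms, hidx, pa, pe, pi, po, pu]

theorem countPerms_alt_cast {n : Int} (hn : 1 ≤ n) :
    ((countPerms_alt n : Int) : ZMod 1000000007) =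
      ∑ i : Fin 5, ∑ j : Fin 5, ((liftZ tMat) ^ (n.toNat - 1)) i j := by
  have hidx : (n - 1).toNat = n.toNat - 1 := by omega
  have hP : liftZ (matPowLoop (n - 1).toNat tMat idMat5 (n - 1).toNat)
      = (liftZ tMat) ^ ((n - 1).toNat) := by
    rw [liftZ_matPowLoop _ _ (le_refl _), liftZ_id, one_mul]
  have hgrid := isGrid_matPowLoop (n - 1).toNat tMat idMat5 (n - 1).toNat isGrid_id
  simp only [countPerms_alt, cast_pymod]
  rw [sum_entries_cast hgrid, hP, hidx]

theorem sum_vZ (k : Nat) :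
    vZ k 0 + vZ k 1 + vZ k 2 + vZ k 3 + vZ k 4 =
      ∑ i : Fin 5, ∑ j : Fin 5, ((liftZ tMat) ^ k) i j := by
  simp only [vZ, Matrix.mulVec, dotProduct, Fin.sum_univ_five]
  ring

-- ===== VERDICT (by name: the statement is the Claim_ definition above) =====
theorem countPerms_spec : Claim_equal_countPerms := by
  intro n _ hpre
  have hn : 1 ≤ n := hpre
  unfold Spec_countPerms
  -- both sides are final '% MOD' results, hence in [0, MOD)
  have hA := countPerms_eq_sRec hn
  have hAb : 0 ≤ countPerms n ∧ countPerms n < 1000000007 := by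
    rw [hA]; exact pymod_bounds _
  have hBb : 0 ≤ countPerms_alt n ∧ countPerms_alt n < 1000000007 := by
    unfold countPerms_alt; exact pymod_bounds _
  -- their casts to ZMod agree
  obtain ⟨s0, s1, s2, s3, s4⟩ := sRec_cast (n.toNat - 1)
  have hcastA : ((countPerms n : Int) : ZMod 1000000007) =
      ∑ i : Fin 5, ∑ j : Fin 5, ((liftZ tMat) ^ (n.toNat - 1)) i j := by
    rw [hA]
    push_cast [cast_pymod]
    rw [← sum_vZ (n.toNat - 1), ← s0, ← s1, ← s2, ← s3, ← s4]
    ring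
  have hcast : ((countPerms n : Int) : ZMod 1000000007)
      = ((countPerms_alt n : Int) : ZMod 1000000007) := by
    rw [hcastA, countPerms_alt_cast hn]
  exact int_eq_of_cast_eq hAb.1 hAb.2 hBb.1 hBb.2 hcast
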